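-- pv_equiv track=rewrite | github.com/emilstahl97/Open-vSwitch-with-Coflow-Aware-Prediction | coflow-workload-generator/create_pcap_file_CDF.py | create_2d_list
-- ===== SOURCE A (Python) =====
-- def create_2d_list(x, y):
--     if y == 0:
--         raise ValueError("Parameter 'y' must not be zero.")
--
--     num_lists = min(x, y)
--     step_size = x // num_lists
--     remainder = x % num_lists
--
--     result = []
--     start = 0
--
--     for i in range(num_lists):
--         end = start + step_size + (1 if i < remainder else 0)
--         result.append(list(range(start, end)))
--         start = end
--
--     return result
-- ===== SOURCE B (Python) =====
-- def create_2d_list(x, y):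
--     if y == 0:
--         raise ValueError("Parameter 'y' must not be zero.")
--
--     # Greedy ceil-splitting: while k chunks remain, peel off ceil((x - start) / k)
--     # elements; this front-loads the extra elements without ever computing
--     # step_size/remainder up front.
--     result = []
--     start = 0
--     k = min(x, y)
--     while k > 0:
--         size = -((start - x) // k)
--         result.append(list(range(start, start + size)))
--         start += size
--         k -= 1
--     return result
-- ===== Notes on version B (the rewrite author's own statement) =====
-- stated objective: alternative
-- what changed: Replaces A's loop over a precomputed quotient/remainder (step_size, remainder, extras to the first `remainder` chunks) by greedy ceil-splitting: with k chunks left, peel off ceil((x-start)/k) elements and decrement k, never computing step_size/remainder at all.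
import Mathlib
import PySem

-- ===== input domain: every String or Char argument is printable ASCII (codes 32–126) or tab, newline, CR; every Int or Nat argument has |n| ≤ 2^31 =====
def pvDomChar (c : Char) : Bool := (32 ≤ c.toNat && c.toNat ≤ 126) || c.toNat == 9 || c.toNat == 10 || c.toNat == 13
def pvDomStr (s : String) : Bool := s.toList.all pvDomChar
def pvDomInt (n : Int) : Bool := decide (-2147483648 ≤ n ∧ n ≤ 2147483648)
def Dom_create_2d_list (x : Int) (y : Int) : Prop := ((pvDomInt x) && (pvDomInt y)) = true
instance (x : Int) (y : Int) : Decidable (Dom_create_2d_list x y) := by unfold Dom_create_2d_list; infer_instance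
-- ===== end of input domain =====

-- B replaces A's precomputed quotient/remainder loop by greedy ceil-splitting: each step
-- peels off ceil(remaining/k) elements, never computing step_size/remainder up front.

-- ===== PORT A =====
-- Literal port of A: the y == 0 and min x y == 0 guards return a junk [] exactly where
-- the Python raises (ValueError / ZeroDivisionError); Pre_ excludes those inputs.
def create_2d_list (x : Int) (y : Int) : List (List Int) :=
  if y == 0 then [] else
  let num_lists := min x y
  if num_lists == 0 then [] else
  let step_size := PySem.Int.floordiv x num_lists
  let remainder := PySem.Int.mod x num_lists
  let st := (PySem.List.pyRange 0 num_lists 1).foldl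
    (fun (st : List (List Int) × Int) i =>
      let endv := st.2 + step_size + (if i < remainder then 1 else 0)
      (st.1 ++ [PySem.List.pyRange st.2 endv 1], endv))
    ([], 0)
  st.1

-- ===== PORT B =====
-- Source B's while loop: while k > 0 peel off ceil((x-start)/k) elements, append, k -= 1
def pvLoop (x : Int) (result : List (List Int)) (start : Int) (k : Int) : List (List Int) :=
  if h : k ≤ 0 then result else
    let size := -(PySem.Int.floordiv (start - x) k)
    pvLoop x (result ++ [PySem.List.pyRange start (start + size) 1]) (start + size) (k - 1)
termination_by k.toNat
decreasing_by omega

def create_2d_list_alt (x : Int) (y : Int) : List (List Int) :=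
  if y == 0 then [] else pvLoop x [] 0 (min x y)

-- ===== PRECONDITION & SPEC =====
-- Pre_ excludes exactly the inputs where A raises: y = 0 (explicit ValueError) and
-- min x y = 0, i.e. x = 0 with y > 0 (ZeroDivisionError in x // num_lists).
def Pre_create_2d_list (x : Int) (y : Int) : Prop := y ≠ 0 ∧ min x y ≠ 0
instance (x : Int) (y : Int) : Decidable (Pre_create_2d_list x y) := by unfold Pre_create_2d_list; infer_instance
def pvWitness_create_2d_list : Int × Int := (10, 3)

def Spec_create_2d_list (x : Int) (y : Int) (out : List (List Int)) : Prop := out = create_2d_list_alt x y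
instance (x : Int) (y : Int) (out : List (List Int)) : Decidable (Spec_create_2d_list x y out) := by unfold Spec_create_2d_list; infer_instance

-- ===== CLAIM (what is proved, stated in full; the proofs are below) =====
def Claim_equal_create_2d_list : Prop := ∀ (x : Int) (y : Int), Dom_create_2d_list x y → Pre_create_2d_list x y → Spec_create_2d_list x y (create_2d_list x y)

-- ===== LEMMAS AND PROOFS =====

/-- Cons-style form of Source B's loop, convenient for induction. -/
def pvSplit (x : Int) (start : Int) (k : Int) : List (List Int) :=
  if h : k ≤ 0 then [] else
    let size := -(PySem.Int.floordiv (start - x) k)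
    PySem.List.pyRange start (start + size) 1 :: pvSplit x (start + size) (k - 1)
termination_by k.toNat
decreasing_by omega

theorem pvLoop_split (x : Int) : ∀ (m : Nat) (start k : Int), k.toNat = m →
    ∀ (acc : List (List Int)), pvLoop x acc start k = acc ++ pvSplit x start k := by
  intro m
  induction m using Nat.strong_induction_on with
  | _ m ih =>
  intro start k hkm acc
  rw [pvLoop, pvSplit]
  by_cases hk : k ≤ 0
  · simp [hk]
  · simp only [hk, dif_neg, not_false_iff]
    rw [ih (k - 1).toNat (by omega) _ (k - 1) rfl]
    simp

/-- Consecutive chunks of the given sizes starting at `s`. -/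
def pvChunks (s : Int) : List Int → List (List Int)
  | [] => []
  | a :: t => PySem.List.pyRange s (s + a) 1 :: pvChunks (s + a) t

theorem afold_chunks (f : Int → Int) (is : List Int) (acc : List (List Int)) (s : Int) :
    is.foldl
      (fun (st : List (List Int) × Int) i =>
        (st.1 ++ [PySem.List.pyRange st.2 (st.2 + f i) 1], st.2 + f i)) (acc, s)
      = (acc ++ pvChunks s (is.map f), s + (is.map f).sum) := by
  induction is generalizing acc s with
  | nil => simp [pvChunks]
  | cons a t ih =>
    simp only [List.foldl_cons, List.map_cons, List.sum_cons]
    rw [ih]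
    simp [pvChunks, add_assoc]

/-- Ceil-splitting front-loads the extra elements exactly like A's quotient/remainder loop. -/
theorem split_eq (n step r x : Int) (hn : 0 < n) (hx : x = n * step + r)
    (h0 : 0 ≤ r) (hr : r < n) :
    ∀ (m : Nat) (i : Int), 0 ≤ i → i + m = n →
      pvSplit x (i * step + min i r) m
        = pvChunks (i * step + min i r)
            ((PySem.List.pyRange i n 1).map (fun j => step + (if j < r then 1 else 0))) := by
  intro m
  induction m with
  | zero =>
    intro i hi hin
    have : i = n := by omega
    subst this
    rw [pvSplit]
    simp [PySem.List.pyRange, pvChunks]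
  | succ m ih =>
    intro i hi hin
    have hilt : i < n := by omega
    have hrange : PySem.List.pyRange i n 1 = i :: PySem.List.pyRange (i + 1) n 1 :=
      PySem.List.pyRange_one_cons hilt
    -- the first chunk size that B computes
    have hk : (0 : Int) < (m : Int) + 1 := by positivity
    have hsz : -(PySem.Int.floordiv (i * step + min i r - x) ((m : Int) + 1))
        = step + (if i < r then 1 else 0) := by
      have hkeq : ((m : Int) + 1) = n - i := by omega
      rw [show i * step + min i r - x = -(x - (i * step + min i r)) by ring,
          PySem.Int.neg_floordiv_neg_eq_iff_of_pos hk, hkeq]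
      by_cases hir : i < r
      · have hm1 : min i r = i := by omega
        simp only [hir, if_true, hm1]
        constructor <;> nlinarith
      · have hm1 : min i r = r := by omega
        simp only [hir, if_false, hm1]
        constructor <;> nlinarith
    rw [pvSplit]
    have hm : ¬ ((m : Int) + 1 ≤ 0) := by omega
    simp only [Nat.cast_succ, hm, dif_neg, not_false_iff]
    rw [hsz, hrange, List.map_cons]
    rw [pvChunks]
    have hnext : i * step + min i r + (step + (if i < r then 1 else 0))
        = (i + 1) * step + min (i + 1) r := by
      by_cases hir : i < r
      · have h1 : min i r = i := by omega
        have h2 : min (i + 1) r = i + 1 := by omega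
        rw [h1, h2]; simp [hir]; ring
      · have h1 : min i r = r := by omega
        have h2 : min (i + 1) r = r := by omega
        rw [h1, h2]; simp [hir]; ring
    rw [hnext]
    have : ((m : Int) + 1) - 1 = (m : Int) := by ring
    rw [this, ih (i + 1) (by omega) (by omega)]

-- ===== VERDICT (by name: the statement is the Claim_ definition above) =====
theorem create_2d_list_spec : Claim_equal_create_2d_list := by
  intro x y _ hpre
  obtain ⟨hy, hn⟩ := hpre
  unfold Spec_create_2d_list create_2d_list create_2d_list_alt
  have hy' : (y == 0) = false := by simpa using hy
  have hn' : (min x y == 0) = false := by simpa using hn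
  simp only [hy', hn', Bool.false_eq_true, if_false]
  set n := min x y with hndef
  by_cases hpos : 0 < n
  · -- positive number of chunks
    set step := PySem.Int.floordiv x n with hstep
    set r := PySem.Int.mod x n with hr
    have hx : x = n * step + r := by
      have := PySem.Int.floordiv_mul_add_mod x n
      rw [← hstep, ← hr] at this; linarith [this]
    have h0 : 0 ≤ r := PySem.Int.mod_nonneg x hpos
    have hrlt : r < n := PySem.Int.mod_lt x hpos
    have hbody :
        (fun (st : List (List Int) × Int) (i : Int) =>
          let endv := st.2 + step + (if i < r then 1 else 0)
          (st.1 ++ [PySem.List.pyRange st.2 endv 1], endv))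
        = (fun (st : List (List Int) × Int) (i : Int) =>
          (st.1 ++ [PySem.List.pyRange st.2
              (st.2 + (fun i => step + (if i < r then 1 else 0)) i) 1],
           st.2 + (fun i => step + (if i < r then 1 else 0)) i)) := by
      funext st i
      simp [add_assoc]
    rw [hbody, afold_chunks]
    have := split_eq n step r x hpos hx h0 hrlt n.toNat 0 le_rfl (by omega)
    have hmin0 : min (0 : Int) r = 0 := by omega
    have hcast : ((n.toNat : Int)) = n := by omega
    simp only [zero_mul, zero_add, hmin0, hcast] at this
    rw [pvLoop_split x n.toNat 0 n rfl, this]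
  · -- n < 0 (n ≠ 0 by Pre_): A's range is empty, B's split stops immediately
    have hneg : n < 0 := by omega
    have h1 : PySem.List.pyRange 0 n 1 = [] := by
      simp [PySem.List.pyRange]; omega
    rw [h1, pvLoop]
    rw [dif_pos (by omega : n ≤ 0)]
    simp
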